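-- pv_equiv track=rewrite | github.com/MrBrantCode/unitest_baseline | mut_generate/mist_train_taco/taco_18678/solution.py | minimize_experience_difference_and_maximize_liking
-- ===== SOURCE A (Python) =====
-- from itertools import combinations, product
--
-- def minimize_experience_difference_and_maximize_liking(n, likings, experience):
--     Teams = [[1, 1, 5], [1, 2, 4], [1, 3, 3], [2, 2, 3]]
--     Names = {
--         'Anka': 0,
--         'Chapay': 1,
--         'Cleo': 2,
--         'Dracul': 3,
--         'Hexadecimal': 4,
--         'Snowy': 5,
--         'Troll': 6
--     }
--     graph = [[0] * 7 for _ in range(7)]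
--
--     for (p, q) in likings:
--         p = Names[p]
--         q = Names[q]
--         graph[p][q] = 1
--
--     a, b, c = sorted(experience)
--     E_diff_star = float('inf')
--     team_all = []
--
--     for (t1, t2, t3) in Teams:
--         E = [a // t1, b // t2, c // t3]
--         E_diff = max(E) - min(E)
--         if E_diff < E_diff_star:
--             E_diff_star = E_diff
--             team_all = [[t1, t2, t3]]
--         elif E_diff == E_diff_star:
--             team_all.append([t1, t2, t3])
--
--     liking = 0
--     for team in team_all:
--         for te2 in combinations(set(range(7)), team[2]):
--             te2 = set(te2)
--             left = set(range(7)) - te2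
--             L2 = sum((graph[p][q] for (p, q) in product(te2, te2)))
--             for te1 in combinations(left, team[1]):
--                 te1 = set(te1)
--                 te0 = left - te1
--                 L1 = sum((graph[p][q] for (p, q) in product(te1, te1)))
--                 L0 = sum((graph[p][q] for (p, q) in product(te0, te0)))
--                 L = L2 + L1 + L0
--                 if L > liking:
--                     liking = L
--
--     return E_diff_star, liking
-- ===== SOURCE B (Python) =====
-- from itertools import product
--
-- def minimize_experience_difference_and_maximize_liking(n, likings, experience):
--     names = {'Anka': 0, 'Chapay': 1, 'Cleo': 2, 'Dracul': 3,
--              'Hexadecimal': 4, 'Snowy': 5, 'Troll': 6}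
--     # deduplicated directed edge set (self-pairs kept, as the original counts them)
--     edges = {(names[p], names[q]) for (p, q) in likings}
--     a, b, c = sorted(experience)
--     teams = [(1, 1, 5), (1, 2, 4), (1, 3, 3), (2, 2, 3)]
--     diffs = [max(a // t1, b // t2, c // t3) - min(a // t1, b // t2, c // t3)
--              for (t1, t2, t3) in teams]
--     best = min(diffs)
--     sizes = [t for (t, d) in zip(teams, diffs) if d == best]
--     # one flat scan over all 3^7 team-label assignments, filtered by size profile
--     liking = 0
--     for lab in product(range(3), repeat=7):
--         if (lab.count(0), lab.count(1), lab.count(2)) in sizes: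
--             L = sum(1 for (p, q) in edges if lab[p] == lab[q])
--             if L > liking:
--                 liking = L
--     return best, liking
-- ===== Notes on version B (the rewrite author's own statement) =====
-- stated objective: alternative
-- what changed: B replaces A's two-stage nested combinations enumeration over an adjacency matrix by a single flat scan over all 3^7 team-label assignments filtered by their size profile (count of each label) against the tied team triples, counting same-label edges of a deduplicated edge set; team selection is a diffs list, min and filter instead of A's running-best loop.
import Mathlib
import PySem

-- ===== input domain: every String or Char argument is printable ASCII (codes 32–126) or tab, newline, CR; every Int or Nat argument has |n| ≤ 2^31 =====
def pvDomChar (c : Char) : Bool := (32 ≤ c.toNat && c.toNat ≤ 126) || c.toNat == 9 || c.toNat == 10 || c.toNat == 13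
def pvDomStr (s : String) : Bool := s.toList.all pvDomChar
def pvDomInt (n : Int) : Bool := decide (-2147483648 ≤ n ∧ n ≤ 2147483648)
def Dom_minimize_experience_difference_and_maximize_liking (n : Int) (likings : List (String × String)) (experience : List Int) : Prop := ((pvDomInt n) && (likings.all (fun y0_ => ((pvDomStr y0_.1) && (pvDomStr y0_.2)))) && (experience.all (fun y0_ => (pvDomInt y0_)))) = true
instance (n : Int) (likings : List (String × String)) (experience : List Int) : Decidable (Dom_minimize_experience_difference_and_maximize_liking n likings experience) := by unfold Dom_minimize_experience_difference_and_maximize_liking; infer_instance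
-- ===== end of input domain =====

-- B replaces A's nested combinations enumeration over an adjacency matrix by one flat
-- scan over all 3^7 team-label assignments filtered by their size profile, counting
-- same-label edges of a deduplicated edge set (objective: alternative; equal values proved).

-- ===== PORT A =====
-- Names dict of the Python
def pvNames : PySem.Dict String Int :=
  PySem.Dict.ofList [("Anka", 0), ("Chapay", 1), ("Cleo", 2), ("Dracul", 3),
                     ("Hexadecimal", 4), ("Snowy", 5), ("Troll", 6)]

def pvTeams : List (Int × Int × Int) := [(1, 1, 5), (1, 2, 4), (1, 3, 3), (2, 2, 3)]

-- set(range(7)) / range(7): CPython iterates a set of the ints 0..6 in ascending order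
def pvRange7 : List Int := [0, 1, 2, 3, 4, 5, 6]

-- graph[p][q]; indices produced by Names are 0..6, so .toNat indexing is exact here
def pvGget (g : List (List Int)) (p q : Int) : Int :=
  (g.getD p.toNat []).getD q.toNat 0

-- graph[p][q] = 1
def pvGset (g : List (List Int)) (p q : Int) : List (List Int) :=
  g.set p.toNat ((g.getD p.toNat []).set q.toNat 1)

-- the likings loop of A; an unknown name raises KeyError in Python (excluded by Pre_), skipped here
def pvGraph (likings : List (String × String)) : List (List Int) :=
  likings.foldl
    (fun g pq =>
      match pvNames.get? pq.1, pvNames.get? pq.2 with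
      | some p, some q => pvGset g p q
      | _, _ => g)
    (List.replicate 7 (List.replicate 7 0))

-- product(t, t) of itertools
def pvProd (t : List Int) : List (Int × Int) :=
  t.flatMap (fun p => t.map (fun q => (p, q)))

-- sum(graph[p][q] for (p,q) in product(t,t))
def pvSumProd (g : List (List Int)) (t : List Int) : Int :=
  ((pvProd t).map (fun pq => pvGget g pq.1 pq.2)).sum

-- the Teams selection loop; None models float('inf') (an int is always < inf, = never holds)
def pvSelA (a b c : Int) : Option Int × List (Int × Int × Int) :=
  pvTeams.foldl
    (fun st t =>
      let ediff : Int :=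
        max (max (PySem.Int.floordiv a t.1) (PySem.Int.floordiv b t.2.1)) (PySem.Int.floordiv c t.2.2)
        - min (min (PySem.Int.floordiv a t.1) (PySem.Int.floordiv b t.2.1)) (PySem.Int.floordiv c t.2.2)
      match st.1 with
      | none => (some ediff, [t])
      | some s =>
        if ediff < s then (some ediff, [t])
        else if ediff = s then (st.1, st.2 ++ [t])
        else st)
    (none, [])

-- the liking loop of A (team sizes are the positive literals 1..5, so .toNat is exact)
def pvLikingA (g : List (List Int)) (tl : List (Int × Int × Int)) : Int :=
  tl.foldl
    (fun lk team =>
      (PySem.List.combinations pvRange7 team.2.2.toNat).foldl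
        (fun lk te2 =>
          let left := pvRange7.filter (fun h => !te2.contains h)
          let l2 := pvSumProd g te2
          (PySem.List.combinations left team.2.1.toNat).foldl
            (fun lk te1 =>
              let te0 := left.filter (fun h => !te1.contains h)
              let l1 := pvSumProd g te1
              let l0 := pvSumProd g te0
              let l := l2 + l1 + l0
              if l > lk then l else lk)
            lk)
        lk)
    0

def minimize_experience_difference_and_maximize_liking (n : Int) (likings : List (String × String)) (experience : List Int) : Int × Int :=
  let g := pvGraph likings
  -- a, b, c = sorted(experience): raises unless exactly 3 elements (excluded by Pre_)
  match PySem.List.sorted experience (fun x => x) false with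
  | [a, b, c] =>
    let sel := pvSelA a b c
    -- Teams is nonempty, so sel.1 is always some int; .getD 0 never fires its default
    (sel.1.getD 0, pvLikingA g sel.2)
  | _ => (0, 0)

-- ===== PORT B =====
def pvNamesB : PySem.Dict String Int :=
  PySem.Dict.ofList [("Anka", 0), ("Chapay", 1), ("Cleo", 2), ("Dracul", 3),
                     ("Hexadecimal", 4), ("Snowy", 5), ("Troll", 6)]

def pvTeamsB : List (Int × Int × Int) := [(1, 1, 5), (1, 2, 4), (1, 3, 3), (2, 2, 3)]

-- edge-set comprehension of Source B; unknown names raise KeyError in Python (excluded by Pre_)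
def pvEdges (likings : List (String × String)) : List (Int × Int) :=
  likings.foldl
    (fun e pq =>
      match pvNamesB.get? pq.1, pvNamesB.get? pq.2 with
      | some p, some q => PySem.Set.add e (p, q)
      | _, _ => e)
    PySem.Set.empty

def pvDiffs (a b c : Int) : List Int :=
  pvTeamsB.map (fun t =>
    max (max (PySem.Int.floordiv a t.1) (PySem.Int.floordiv b t.2.1)) (PySem.Int.floordiv c t.2.2)
    - min (min (PySem.Int.floordiv a t.1) (PySem.Int.floordiv b t.2.1)) (PySem.Int.floordiv c t.2.2))

-- min(diffs): the list is nonempty, so .getD 0 never fires its default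
def pvBest (a b c : Int) : Int :=
  (PySem.List.min? (pvDiffs a b c) (fun x => x)).getD 0

def pvTeamAll (a b c : Int) : List (Int × Int × Int) :=
  ((pvTeamsB.zip (pvDiffs a b c)).filter (fun td => td.2 == pvBest a b c)).map (fun td => td.1)

-- itertools.product(range(3), repeat=k), in its lexicographic order (first coordinate slowest)
def pvLabs : Nat → List (List Int)
  | 0 => [[]]
  | k + 1 => ([0, 1, 2] : List Int).flatMap (fun x => (pvLabs k).map (x :: ·))

-- sum(1 for (p,q) in edges if lab[p] == lab[q]); edge endpoints are 0..6, so .toNat is exact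
def pvVal (e : List (Int × Int)) (lab : List Int) : Int :=
  e.countP (fun ed => lab.getD ed.1.toNat 0 == lab.getD ed.2.toNat 0)

-- the liking loop of Source B: flat scan of all label assignments, filtered by size profile
def pvLikingB (e : List (Int × Int)) (tl : List (Int × Int × Int)) : Int :=
  (pvLabs 7).foldl
    (fun lk lab =>
      if tl.contains ((lab.count 0 : Int), (lab.count 1 : Int), (lab.count 2 : Int)) then
        let l := pvVal e lab
        if l > lk then l else lk
      else lk)
    0

def minimize_experience_difference_and_maximize_liking_alt (n : Int) (likings : List (String × String)) (experience : List Int) : Int × Int :=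
  let edges := pvEdges likings
  -- a, b, c = sorted(experience): raises unless exactly 3 elements (excluded by Pre_)
  match PySem.List.sorted experience (fun x => x) false with
  | [a, b, c] => (pvBest a b c, pvLikingB edges (pvTeamAll a b c))
  | [] => (0, 0)
  | [_] => (0, 0)
  | [_, _] => (0, 0)
  | _ :: _ :: _ :: _ :: _ => (0, 0)

-- ===== PRECONDITION & SPEC =====
-- Pre_ excludes exactly the inputs where A raises: experience must unpack into three
-- values, and every liking name must be one of the seven hero names (else KeyError).
def Pre_minimize_experience_difference_and_maximize_liking (n : Int) (likings : List (String × String)) (experience : List Int) : Prop :=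
  experience.length = 3 ∧
  ∀ pq ∈ likings,
    pq.1 ∈ ["Anka", "Chapay", "Cleo", "Dracul", "Hexadecimal", "Snowy", "Troll"] ∧
    pq.2 ∈ ["Anka", "Chapay", "Cleo", "Dracul", "Hexadecimal", "Snowy", "Troll"]
instance (n : Int) (likings : List (String × String)) (experience : List Int) : Decidable (Pre_minimize_experience_difference_and_maximize_liking n likings experience) := by unfold Pre_minimize_experience_difference_and_maximize_liking; infer_instance

def pvWitness_minimize_experience_difference_and_maximize_liking : Int × (List (String × String)) × List Int :=
  (0, [("Anka", "Cleo"), ("Cleo", "Anka")], [3, 9, 28])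

def Spec_minimize_experience_difference_and_maximize_liking (n : Int) (likings : List (String × String)) (experience : List Int) (out : Int × Int) : Prop := out = minimize_experience_difference_and_maximize_liking_alt n likings experience
instance (n : Int) (likings : List (String × String)) (experience : List Int) (out : Int × Int) : Decidable (Spec_minimize_experience_difference_and_maximize_liking n likings experience out) := by unfold Spec_minimize_experience_difference_and_maximize_liking; infer_instance

-- ===== CLAIM (what is proved, stated in full; the proofs are below) =====
def Claim_equal_minimize_experience_difference_and_maximize_liking : Prop := ∀ (n : Int) (likings : List (String × String)) (experience : List Int), Dom_minimize_experience_difference_and_maximize_liking n likings experience → Pre_minimize_experience_difference_and_maximize_liking n likings experience → Spec_minimize_experience_difference_and_maximize_liking n likings experience (minimize_experience_difference_and_maximize_liking n likings experience)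

-- ===== LEMMAS AND PROOFS =====

theorem sum_map_indicator {α : Type} (l : List α) (f : α → Int) (p : α → Bool)
    (h : ∀ x ∈ l, f x = if p x then 1 else 0) : (l.map f).sum = (l.countP p : Int) := by
  induction l with
  | nil => simp
  | cons a l ih =>
    rw [List.map_cons, List.sum_cons, List.countP_cons, ih (fun x hx => h x (by simp [hx])),
        h a (by simp)]
    by_cases hp : p a = true <;> simp [hp] <;> omega

theorem countP_or_disjoint {α : Type} (l : List α) (p q : α → Bool)
    (h : ∀ x ∈ l, ¬(p x = true ∧ q x = true)) :
    l.countP (fun x => p x || q x) = l.countP p + l.countP q := by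
  induction l with
  | nil => simp
  | cons a l ih =>
    rw [List.countP_cons, List.countP_cons, List.countP_cons,
        ih (fun x hx => h x (by simp [hx]))]
    have := h a (by simp)
    by_cases hp : p a = true <;> by_cases hq : q a = true <;> simp_all [hp, hq] <;> omega

theorem count_nodup {α : Type} [BEq α] [LawfulBEq α] (m : List α) (hm : m.Nodup) (a : α) :
    m.countP (fun x => x == a) = if a ∈ m then 1 else 0 := by
  induction m with
  | nil => simp
  | cons b m ih =>
    rw [List.countP_cons]
    simp only [List.nodup_cons] at hm
    rw [ih hm.2]
    by_cases hb : b = a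
    · subst hb
      simp [hm.1]
    · by_cases ha : a ∈ m <;> simp [hb, ha, Ne.symm hb]

theorem countP_mem_comm {α : Type} [BEq α] [LawfulBEq α] (l m : List α)
    (hl : l.Nodup) (hm : m.Nodup) :
    l.countP (fun x => m.contains x) = m.countP (fun x => l.contains x) := by
  induction l with
  | nil => simp
  | cons a l ih =>
    simp only [List.nodup_cons] at hl
    rw [List.countP_cons, ih hl.2]
    have hsplit : m.countP (fun x => (a :: l).contains x) =
        m.countP (fun x => (x == a) || l.contains x) := by
      apply List.countP_congr
      intro x _
      simp [List.contains_cons, BEq.comm]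
    rw [hsplit, countP_or_disjoint m _ _ (fun x _ hx => hl.1 (by
      obtain ⟨h1, h2⟩ := hx
      simp only [beq_iff_eq] at h1
      simp only [List.contains_iff_mem] at h2
      exact h1 ▸ h2)), count_nodup m hm a]
    have heta : List.countP (fun x => l.contains x) m = List.countP l.contains m := rfl
    rw [heta]
    simp only [List.contains_iff_mem]
    by_cases ha : a ∈ m <;> simp [ha] <;> omega

theorem mem_pvProd (t : List Int) (x : Int × Int) : x ∈ pvProd t ↔ x.1 ∈ t ∧ x.2 ∈ t := by
  constructor
  · intro h
    simp only [pvProd, List.mem_flatMap, List.mem_map] at h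
    obtain ⟨p, hp, q, hq, rfl⟩ := h
    exact ⟨hp, hq⟩
  · intro ⟨h1, h2⟩
    simp only [pvProd, List.mem_flatMap, List.mem_map]
    exact ⟨x.1, h1, x.2, h2, rfl⟩

theorem nodup_pvProd (t : List Int) (h : t.Nodup) : (pvProd t).Nodup := by
  have he : pvProd t = t ×ˢ t := rfl
  rw [he]
  exact h.product h

theorem pvSumProd_eq (g : List (List Int)) (E : List (Int × Int)) (t : List Int)
    (hnd : E.Nodup) (htn : t.Nodup)
    (hinv : ∀ x ∈ pvProd t, pvGget g x.1 x.2 = if x ∈ E then 1 else 0) :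
    pvSumProd g t = (E.countP (fun e => t.contains e.1 && t.contains e.2) : Int) := by
  rw [pvSumProd, sum_map_indicator _ _ (fun pq => E.contains pq)
    (fun x hx => by rw [hinv x hx]; by_cases h : x ∈ E <;> simp [h])]
  congr 1
  rw [countP_mem_comm _ _ (nodup_pvProd t htn) hnd]
  apply List.countP_congr
  intro x _
  simp only [List.contains_iff_mem, mem_pvProd]
  by_cases h1 : x.1 ∈ t <;> by_cases h2 : x.2 ∈ t <;> simp [h1, h2]

def pvLab (te2 te1 : List Int) : List Int :=
  pvRange7.map (fun h => if te2.contains h then (2 : Int) else if te1.contains h then 1 else 0)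

theorem pvLab_get (te2 te1 : List Int) (p : Int) (hp : p ∈ pvRange7) :
    (pvLab te2 te1).getD p.toNat 0 =
    (if te2.contains p then (2 : Int) else if te1.contains p then 1 else 0) := by
  fin_cases hp <;> rfl

theorem te0_contains (te2 te1 : List Int) (p : Int) (hp : p ∈ pvRange7) :
    ((pvRange7.filter (fun h => !te2.contains h)).filter (fun h => !te1.contains h)).contains p =
    (!te2.contains p && !te1.contains p) := by
  by_cases c2 : te2.contains p <;> by_cases c1 : te1.contains p <;>
    simp [List.contains_iff_mem, List.mem_filter, hp, c2, c1, Bool.and_comm]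

theorem lab_cond (te2 te1 : List Int)
    (h1 : ∀ h ∈ te1, h ∈ pvRange7.filter (fun h => !te2.contains h))
    (e : Int × Int) (hp : e.1 ∈ pvRange7) (hq : e.2 ∈ pvRange7) :
    ((pvLab te2 te1).getD e.1.toNat 0 == (pvLab te2 te1).getD e.2.toNat 0) =
    ((te2.contains e.1 && te2.contains e.2) ||
     ((te1.contains e.1 && te1.contains e.2) ||
      (((pvRange7.filter (fun h => !te2.contains h)).filter (fun h => !te1.contains h)).contains e.1 &&
       ((pvRange7.filter (fun h => !te2.contains h)).filter (fun h => !te1.contains h)).contains e.2))) := by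
  have himp : ∀ x : Int, te1.contains x = true → te2.contains x = false := by
    intro x hx
    rw [List.contains_iff_mem] at hx
    have := h1 x hx
    simp only [List.mem_filter] at this
    simpa using this.2
  rw [pvLab_get _ _ _ hp, pvLab_get _ _ _ hq, te0_contains _ te1 _ hp, te0_contains _ te1 _ hq]
  by_cases c2p : te2.contains e.1 <;> by_cases c2q : te2.contains e.2 <;>
    by_cases c1p : te1.contains e.1 <;> by_cases c1q : te1.contains e.2 <;>
      first
      | (exfalso; exact Bool.false_ne_true ((himp e.1 c1p) ▸ c2p))
      | (exfalso; exact Bool.false_ne_true ((himp e.2 c1q) ▸ c2q))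
      | (simp only [List.contains_iff_mem] at c2p c2q c1p c1q
         simp [c2p, c2q, c1p, c1q])

theorem partition_count (E : List (Int × Int)) (hE : ∀ x ∈ E, x.1 ∈ pvRange7 ∧ x.2 ∈ pvRange7)
    (te2 te1 : List Int)
    (h1 : ∀ h ∈ te1, h ∈ pvRange7.filter (fun h => !te2.contains h)) :
    (E.countP (fun e => (pvLab te2 te1).getD e.1.toNat 0 == (pvLab te2 te1).getD e.2.toNat 0)) =
    E.countP (fun e => te2.contains e.1 && te2.contains e.2) +
    E.countP (fun e => te1.contains e.1 && te1.contains e.2) +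
    E.countP (fun e =>
      ((pvRange7.filter (fun h => !te2.contains h)).filter (fun h => !te1.contains h)).contains e.1 &&
      ((pvRange7.filter (fun h => !te2.contains h)).filter (fun h => !te1.contains h)).contains e.2) := by
  have himp : ∀ x : Int, te1.contains x = true → te2.contains x = false := by
    intro x hx
    rw [List.contains_iff_mem] at hx
    have := h1 x hx
    simp only [List.mem_filter] at this
    simpa using this.2
  rw [List.countP_congr (fun e he => by rw [lab_cond te2 te1 h1 e (hE e he).1 (hE e he).2])]
  rw [countP_or_disjoint E _ _ (by
    intro e he ⟨ha, hb⟩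
    simp only [Bool.and_eq_true] at ha
    simp only [Bool.or_eq_true, Bool.and_eq_true] at hb
    rcases hb with ⟨hb1, _⟩ | ⟨hb1, _⟩
    · exact absurd ((himp e.1 hb1).symm.trans ha.1) (by decide)
    · rw [te0_contains te2 te1 e.1 (hE e he).1] at hb1
      simp only [Bool.and_eq_true, Bool.not_eq_true'] at hb1
      exact absurd (hb1.1.symm.trans ha.1) (by decide))]
  rw [countP_or_disjoint E _ _ (by
    intro e he ⟨ha, hb⟩
    simp only [Bool.and_eq_true] at ha hb
    have := hb.1
    rw [te0_contains te2 te1 e.1 (hE e he).1] at this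
    simp only [Bool.and_eq_true, Bool.not_eq_true'] at this
    exact absurd (this.2.symm.trans ha.1) (by decide))]
  omega

def pvGood (g : List (List Int)) (e : List (Int × Int)) : Prop :=
  g.length = 7 ∧ (∀ r ∈ g, r.length = 7) ∧ e.Nodup ∧
  (∀ x ∈ e, x.1 ∈ pvRange7 ∧ x.2 ∈ pvRange7) ∧
  (∀ p q : Int, p ∈ pvRange7 → q ∈ pvRange7 → pvGget g p q = if (p, q) ∈ e then 1 else 0)

theorem partition_L (g : List (List Int)) (E : List (Int × Int)) (hGood : pvGood g E)
    (k2 k1 : Nat) (te2 te1 : List Int)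
    (h2 : te2 ∈ PySem.List.combinations pvRange7 k2)
    (h1 : te1 ∈ PySem.List.combinations (pvRange7.filter (fun h => !te2.contains h)) k1) :
    pvSumProd g te2 + pvSumProd g te1 +
      pvSumProd g ((pvRange7.filter (fun h => !te2.contains h)).filter (fun h => !te1.contains h)) =
    pvVal E (pvLab te2 te1) := by
  obtain ⟨hlen7, hrows, hnd, hbound, hinv⟩ := hGood
  have hnd7 : pvRange7.Nodup := by decide
  have hsub2 : te2.Sublist pvRange7 := PySem.List.sublist_of_mem_combinations h2
  have hnd2 : te2.Nodup := hsub2.nodup hnd7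
  have hndL : (pvRange7.filter (fun h => !te2.contains h)).Nodup := hnd7.filter _
  have hsub1 : te1.Sublist (pvRange7.filter (fun h => !te2.contains h)) :=
    PySem.List.sublist_of_mem_combinations h1
  have hnd1 : te1.Nodup := hsub1.nodup hndL
  have hnd0 : ((pvRange7.filter (fun h => !te2.contains h)).filter (fun h => !te1.contains h)).Nodup :=
    hndL.filter _
  have hmem : ∀ t : List Int, (∀ x ∈ t, x ∈ pvRange7) →
      ∀ x ∈ pvProd t, pvGget g x.1 x.2 = if x ∈ E then 1 else 0 := by
    intro t ht x hx
    rw [mem_pvProd] at hx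
    have := hinv x.1 x.2 (ht _ hx.1) (ht _ hx.2)
    rwa [Prod.mk.eta] at this
  have hs2 : ∀ x ∈ te2, x ∈ pvRange7 := fun x hx => hsub2.subset hx
  have hsL : ∀ x ∈ pvRange7.filter (fun h => !te2.contains h), x ∈ pvRange7 :=
    fun x hx => (List.mem_filter.1 hx).1
  have hs1 : ∀ x ∈ te1, x ∈ pvRange7 := fun x hx => hsL _ (hsub1.subset hx)
  have hs0 : ∀ x ∈ (pvRange7.filter (fun h => !te2.contains h)).filter (fun h => !te1.contains h),
      x ∈ pvRange7 := fun x hx => hsL _ (List.mem_filter.1 hx).1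
  rw [pvVal, pvSumProd_eq g E te2 hnd hnd2 (hmem te2 hs2),
      pvSumProd_eq g E te1 hnd hnd1 (hmem te1 hs1),
      pvSumProd_eq g E _ hnd hnd0 (hmem _ hs0),
      partition_count E hbound te2 te1 (fun h hh => hsub1.subset hh)]
  push_cast
  ring

theorem mem_range7_iff (p : Int) : p ∈ pvRange7 ↔ 0 ≤ p ∧ p < 7 := by
  simp only [pvRange7, List.mem_cons, List.not_mem_nil, or_false]
  omega

theorem names_some (s : String)
    (hs : s ∈ ["Anka", "Chapay", "Cleo", "Dracul", "Hexadecimal", "Snowy", "Troll"]) :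
    ∃ v, pvNames.get? s = some v ∧ v ∈ pvRange7 := by
  fin_cases hs
  exacts [⟨0, rfl, by decide⟩, ⟨1, rfl, by decide⟩, ⟨2, rfl, by decide⟩, ⟨3, rfl, by decide⟩,
          ⟨4, rfl, by decide⟩, ⟨5, rfl, by decide⟩, ⟨6, rfl, by decide⟩]

theorem gget_gset (g : List (List Int)) (hlen : g.length = 7) (hrows : ∀ r ∈ g, r.length = 7)
    (i j p q : Int) (hi : i ∈ pvRange7) (hj : j ∈ pvRange7) (hp : p ∈ pvRange7) (hq : q ∈ pvRange7) :
    pvGget (pvGset g i j) p q = if p = i ∧ q = j then 1 else pvGget g p q := by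
  rw [mem_range7_iff] at hi hj hp hq
  have hpl : p.toNat < g.length := by omega
  have hil : i.toNat < g.length := by omega
  have hrow : (g.getD i.toNat []).length = 7 := hrows _ ((List.getD_eq_getElem g [] hil).symm ▸ g.getElem_mem hil)
  have hrowp : (g.getD p.toNat []).length = 7 := hrows _ ((List.getD_eq_getElem g [] hpl).symm ▸ g.getElem_mem hpl)
  unfold pvGget pvGset
  have e1 : (g.set i.toNat ((g.getD i.toNat []).set j.toNat 1)).getD p.toNat [] =
      (g.set i.toNat ((g.getD i.toNat []).set j.toNat 1))[p.toNat]'(by simp; omega) :=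
    List.getD_eq_getElem _ [] (by simp; omega)
  rw [e1, List.getElem_set]
  by_cases hip : i.toNat = p.toNat
  · have hpi : p = i := by omega
    subst hpi
    rw [if_pos hip]
    have e2 : ((g.getD p.toNat []).set j.toNat 1).getD q.toNat 0 =
        ((g.getD p.toNat []).set j.toNat 1)[q.toNat]'(by rw [List.length_set, hrowp]; omega) :=
      List.getD_eq_getElem _ 0 (by rw [List.length_set, hrowp]; omega)
    rw [e2, List.getElem_set]
    by_cases hjq : j.toNat = q.toNat
    · have hqj : q = j := by omega
      rw [if_pos hjq, if_pos ⟨rfl, hqj⟩]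
    · have hqj : ¬(q = j) := by omega
      rw [if_neg hjq, if_neg (fun hc => hqj hc.2)]
      rw [List.getD_eq_getElem (g.getD p.toNat []) 0 (by rw [hrowp]; omega)]
  · have hpi : ¬(p = i) := by omega
    rw [if_neg hip, if_neg (fun hc => hpi hc.1)]
    rw [List.getD_eq_getElem g [] hpl]

theorem good_step (g : List (List Int)) (E : List (Int × Int)) (i j : Int)
    (hG : pvGood g E) (hi : i ∈ pvRange7) (hj : j ∈ pvRange7) :
    pvGood (pvGset g i j) (PySem.Set.add E (i, j)) := by
  obtain ⟨h1, h2, h3, h4, h5⟩ := hG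
  have hil : i.toNat < g.length := by rw [mem_range7_iff] at hi; omega
  refine ⟨by unfold pvGset; simp [h1], ?_, PySem.Set.nodup_add _ _ h3, ?_, ?_⟩
  · intro r hr
    rw [List.mem_iff_getElem] at hr
    obtain ⟨k, hk, rfl⟩ := hr
    simp only [pvGset] at hk ⊢
    rw [List.getElem_set]
    by_cases hik : i.toNat = k
    · rw [if_pos hik, List.length_set]
      exact h2 _ ((List.getD_eq_getElem g [] hil).symm ▸ g.getElem_mem hil)
    · rw [if_neg hik]
      exact h2 _ (g.getElem_mem _)
  · intro x hx
    rw [PySem.Set.mem_add] at hx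
    rcases hx with hx | rfl
    · exact h4 x hx
    · exact ⟨hi, hj⟩
  · intro p q hp hq
    rw [gget_gset g h1 h2 i j p q hi hj hp hq]
    by_cases hc : p = i ∧ q = j
    · rw [if_pos hc, if_pos (by rw [PySem.Set.mem_add]; right; rw [hc.1, hc.2])]
    · rw [if_neg hc, h5 p q hp hq]
      have : ((p, q) ∈ PySem.Set.add E (i, j)) ↔ (p, q) ∈ E := by
        rw [PySem.Set.mem_add]
        constructor
        · rintro (h | h)
          · exact h
          · exact absurd ⟨congrArg Prod.fst h, congrArg Prod.snd h⟩ hc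
        · exact Or.inl
      by_cases hm : (p, q) ∈ E
      · rw [if_pos hm, if_pos (this.2 hm)]
      · rw [if_neg hm, if_neg (fun hmm => hm (this.1 hmm))]

theorem good_fold (l : List (String × String))
    (h : ∀ pq ∈ l,
      pq.1 ∈ ["Anka", "Chapay", "Cleo", "Dracul", "Hexadecimal", "Snowy", "Troll"] ∧
      pq.2 ∈ ["Anka", "Chapay", "Cleo", "Dracul", "Hexadecimal", "Snowy", "Troll"]) :
    ∀ (g : List (List Int)) (E : List (Int × Int)), pvGood g E →
      pvGood
        (l.foldl (fun g pq =>
          match pvNames.get? pq.1, pvNames.get? pq.2 with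
          | some p, some q => pvGset g p q
          | _, _ => g) g)
        (l.foldl (fun e pq =>
          match pvNames.get? pq.1, pvNames.get? pq.2 with
          | some p, some q => PySem.Set.add e (p, q)
          | _, _ => e) E) := by
  induction l with
  | nil => exact fun g E hG => hG
  | cons pq l ih =>
    intro g E hG
    obtain ⟨i, hgi, hir⟩ := names_some pq.1 (h pq (by simp)).1
    obtain ⟨j, hgj, hjr⟩ := names_some pq.2 (h pq (by simp)).2
    rw [List.foldl_cons, List.foldl_cons, hgi, hgj]
    exact ih (fun x hx => h x (by simp [hx])) _ _ (good_step g E i j hG hir hjr)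

theorem pv_graph_edges_good (likings : List (String × String))
    (h : ∀ pq ∈ likings,
      pq.1 ∈ ["Anka", "Chapay", "Cleo", "Dracul", "Hexadecimal", "Snowy", "Troll"] ∧
      pq.2 ∈ ["Anka", "Chapay", "Cleo", "Dracul", "Hexadecimal", "Snowy", "Troll"]) :
    pvGood (pvGraph likings) (pvEdges likings) := by
  have hinit : pvGood (List.replicate 7 (List.replicate 7 0)) PySem.Set.empty := by
    refine ⟨by simp, by simp, by simp [PySem.Set.empty], by simp [PySem.Set.empty], ?_⟩
    intro p q hp hq
    rw [mem_range7_iff] at hp hq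
    rw [if_neg (by simp [PySem.Set.empty])]
    unfold pvGget
    have e1 : (List.replicate 7 (List.replicate 7 (0 : Int))).getD p.toNat [] =
        List.replicate 7 (0 : Int) := by
      rw [List.getD_eq_getElem _ _ (by simp; omega), List.getElem_replicate]
    rw [e1]
    have e2 : (List.replicate 7 (0 : Int)).getD q.toNat 0 = 0 := by
      rw [List.getD_eq_getElem _ _ (by simp; omega), List.getElem_replicate]
    rw [e2]
  exact good_fold likings h _ _ hinit

-- ----- generic bounded-max fold lemmas -----

theorem foldl_ge_acc {α : Type} (l : List α) (step : Int → α → Int) :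
    ∀ acc, (∀ lk x, x ∈ l → lk ≤ step lk x) → acc ≤ l.foldl step acc := by
  induction l with
  | nil => intro acc _; simp
  | cons a l ih =>
    intro acc h
    calc acc ≤ step acc a := h acc a (by simp)
      _ ≤ l.foldl step (step acc a) := ih _ (fun lk x hx => h lk x (by simp [hx]))

theorem foldl_le_bound {α : Type} (l : List α) (step : Int → α → Int) (b : Int) :
    ∀ acc, acc ≤ b → (∀ lk x, x ∈ l → lk ≤ b → step lk x ≤ b) → l.foldl step acc ≤ b := by
  induction l with
  | nil => intro acc h1 _; simpa
  | cons a l ih =>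
    intro acc h1 h2
    exact ih (step acc a) (h2 acc a (by simp) h1) (fun lk x hx => h2 lk x (by simp [hx]))

theorem foldl_reach {α : Type} (l : List α) (step : Int → α → Int) (v : Int) (x : α) :
    ∀ acc, x ∈ l → (∀ lk y, y ∈ l → lk ≤ step lk y) → (∀ lk, v ≤ step lk x) →
    v ≤ l.foldl step acc := by
  induction l with
  | nil => intro acc hx _ _; simp at hx
  | cons a l ih =>
    intro acc hx hmono hv
    rcases List.mem_cons.1 hx with rfl | hx
    · calc v ≤ step acc x := hv acc
        _ ≤ l.foldl step (step acc x) :=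
          foldl_ge_acc l step _ (fun lk y hy => hmono lk y (by simp [hy]))
    · exact ih (step acc a) hx (fun lk y hy => hmono lk y (by simp [hy])) hv

-- ----- label lists -----

theorem mem_pvLabs (n : Nat) : ∀ (lab : List Int),
    lab ∈ pvLabs n ↔ lab.length = n ∧ ∀ x ∈ lab, x = 0 ∨ x = 1 ∨ x = 2 := by
  induction n with
  | zero => intro lab; cases lab <;> simp [pvLabs]
  | succ n ih =>
    intro lab
    simp only [pvLabs, List.mem_flatMap, List.mem_map]
    constructor
    · rintro ⟨x, hx, t, ht, rfl⟩
      obtain ⟨hl, he⟩ := (ih t).1 ht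
      refine ⟨by simp [hl], ?_⟩
      intro y hy
      rcases List.mem_cons.1 hy with rfl | hy
      · simpa using hx
      · exact he y hy
    · rintro ⟨hl, he⟩
      cases lab with
      | nil => simp at hl
      | cons x t =>
        refine ⟨x, by simpa using he x (by simp),
          t, (ih t).2 ⟨by simpa using hl, fun y hy => he y (by simp [hy])⟩, rfl⟩

theorem countP_range_getD (lab : List Int) (v : Int) :
    (List.range lab.length).countP (fun i => lab.getD i 0 == v) = lab.count v := by
  induction lab with
  | nil => simp
  | cons x t ih =>
    rw [List.length_cons, List.range_succ_eq_map, List.countP_cons, List.countP_map,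
        List.count_cons]
    have he : ((fun i => (x :: t).getD i 0 == v) ∘ Nat.succ) = (fun i => t.getD i 0 == v) := by
      funext i
      simp
    rw [he, ih]
    by_cases h : (x == v) = true <;> simp [h]

theorem pvRange7_eq_map : pvRange7 = (List.range 7).map (fun i : Nat => (i : Int)) := by
  decide

theorem countP_range7_getD (lab : List Int) (h7 : lab.length = 7) (v : Int) :
    pvRange7.countP (fun h => lab.getD h.toNat 0 == v) = lab.count v := by
  rw [pvRange7_eq_map, List.countP_map]
  have he : ((fun h : Int => lab.getD h.toNat 0 == v) ∘ fun i : Nat => (i : Int)) =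
      (fun i : Nat => lab.getD i 0 == v) := by
    funext i
    simp
  rw [he, ← h7, countP_range_getD]


theorem ind_two (b1 b2 : Bool) : ((if b1 = true then (2 : Int) else if b2 = true then 1 else 0) == 2) = b1 := by
  cases b1 <;> cases b2 <;> decide

theorem ind_one (b1 b2 : Bool) (h : b2 = true → b1 = false) :
    ((if b1 = true then (2 : Int) else if b2 = true then 1 else 0) == 1) = b2 := by
  cases b1 <;> cases b2 <;> simp_all <;> decide

theorem ind_zero (b1 b2 : Bool) : ((if b1 = true then (2 : Int) else if b2 = true then 1 else 0) == 0) = (!b1 && !b2) := by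
  cases b1 <;> cases b2 <;> decide

theorem ind_taut (b1 b2 : Bool) : (b1 || (b2 || (!b1 && !b2))) = true := by
  cases b1 <;> cases b2 <;> decide

-- counts of a constructed label list: te2 members get 2, te1 members 1, the rest 0
theorem count_pvLab (te2 te1 : List Int)
    (hsub2 : te2.Sublist pvRange7)
    (hsub1 : te1.Sublist (pvRange7.filter (fun h => !te2.contains h))) :
    (pvLab te2 te1).count 2 = te2.length ∧
    (pvLab te2 te1).count 1 = te1.length ∧
    (pvLab te2 te1).count 0 + te2.length + te1.length = 7 := by
  have hnd7 : pvRange7.Nodup := by decide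
  have hnd2 : te2.Nodup := hsub2.nodup hnd7
  have hnd1 : te1.Nodup := hsub1.nodup (hnd7.filter _)
  have himp : ∀ x : Int, te1.contains x = true → te2.contains x = false := by
    intro x hx
    rw [List.contains_iff_mem] at hx
    have := List.mem_filter.1 (hsub1.subset hx)
    simpa using this.2
  have hlen : (pvLab te2 te1).length = 7 := by simp [pvLab, pvRange7]
  have hcv : ∀ v : Int, (pvLab te2 te1).count v =
      pvRange7.countP
        (fun h => (if te2.contains h then (2 : Int) else if te1.contains h then 1 else 0) == v) := by
    intro v
    rw [← countP_range7_getD (pvLab te2 te1) hlen v]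
    apply List.countP_congr
    intro h hh
    rw [pvLab_get te2 te1 h hh]
  have hA2 : pvRange7.countP (fun h => te2.contains h) = te2.length := by
    rw [countP_mem_comm pvRange7 te2 hnd7 hnd2,
        List.countP_eq_length.2 (fun x hx => by
          simpa [List.contains_iff_mem] using hsub2.subset hx)]
  have hA1 : pvRange7.countP (fun h => te1.contains h) = te1.length := by
    rw [countP_mem_comm pvRange7 te1 hnd7 hnd1,
        List.countP_eq_length.2 (fun x hx => by
          have := List.mem_filter.1 (hsub1.subset hx)
          simpa [List.contains_iff_mem] using this.1)]
  have h2 : (pvLab te2 te1).count 2 = te2.length := by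
    rw [hcv 2, List.countP_congr (l := pvRange7) (q := fun h => te2.contains h)
        (fun h _ => by rw [ind_two (te2.contains h) (te1.contains h)]), hA2]
  have h1 : (pvLab te2 te1).count 1 = te1.length := by
    rw [hcv 1, List.countP_congr (l := pvRange7) (q := fun h => te1.contains h)
        (fun h _ => by rw [ind_one (te2.contains h) (te1.contains h) (himp h)]), hA1]
  refine ⟨h2, h1, ?_⟩
  have htot : pvRange7.countP
      (fun h => te2.contains h || (te1.contains h || (!te2.contains h && !te1.contains h))) = 7 := by
    rw [List.countP_congr (l := pvRange7) (q := fun _ => true)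
      (fun h _ => by rw [ind_taut (te2.contains h) (te1.contains h)])]
    simp [pvRange7]
  rw [countP_or_disjoint pvRange7 _ _ (by
      intro h _ hx
      rcases hx with ⟨ha, hb⟩
      simp only [Bool.or_eq_true, Bool.and_eq_true, Bool.not_eq_true'] at hb
      rcases hb with hb | ⟨hb, _⟩
      · exact absurd ((himp h hb).symm.trans ha) (by decide)
      · exact absurd (hb.symm.trans ha) (by decide)),
    countP_or_disjoint pvRange7 _ _ (by
      intro h _ hx
      rcases hx with ⟨ha, hb⟩
      simp only [Bool.and_eq_true, Bool.not_eq_true'] at hb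
      exact absurd (hb.2.symm.trans ha) (by decide))] at htot
  have h0 : (pvLab te2 te1).count 0 =
      pvRange7.countP (fun h => !te2.contains h && !te1.contains h) := by
    rw [hcv 0]
    exact List.countP_congr (fun h _ => by rw [ind_zero (te2.contains h) (te1.contains h)])
  rw [h0, hA2, hA1] at *
  omega

-- membership of the constructed label list in the product enumeration
theorem pvLab_mem_labs (te2 te1 : List Int) : pvLab te2 te1 ∈ pvLabs 7 := by
  rw [mem_pvLabs]
  refine ⟨by simp [pvLab, pvRange7], ?_⟩
  intro x hx
  simp only [pvLab, List.mem_map] at hx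
  obtain ⟨h, _, rfl⟩ := hx
  cases hc2 : te2.contains h <;> cases hc1 : te1.contains h <;> simp [hc2, hc1]

theorem contains_filter {α : Type} [BEq α] [LawfulBEq α] (l : List α) (p : α → Bool) (x : α) :
    (l.filter p).contains x = (l.contains x && p x) := by
  by_cases h1 : x ∈ l <;> by_cases h2 : p x = true <;>
    simp [List.contains_iff_mem, List.mem_filter, h1, h2]

theorem pvRange7_getElem (i : Nat) (hi : i < 7) :
    pvRange7[i]'(by simp [pvRange7]; omega) = (i : Int) := by
  interval_cases i <;> rfl

-- reconstructing (te2, te1) from an admissible label list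
theorem lab_decompose (lab : List Int) (hlab : lab ∈ pvLabs 7) :
    pvLab (pvRange7.filter (fun h => lab.getD h.toNat 0 == 2))
          ((pvRange7.filter (fun h => !(pvRange7.filter (fun h => lab.getD h.toNat 0 == 2)).contains h)).filter
            (fun h => lab.getD h.toNat 0 == 1)) = lab ∧
    (pvRange7.filter (fun h => lab.getD h.toNat 0 == 2)).length = lab.count 2 ∧
    ((pvRange7.filter (fun h => !(pvRange7.filter (fun h => lab.getD h.toNat 0 == 2)).contains h)).filter
      (fun h => lab.getD h.toNat 0 == 1)).length = lab.count 1 := by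
  obtain ⟨h7, he⟩ := (mem_pvLabs 7 lab).1 hlab
  refine ⟨?_, ?_, ?_⟩
  · -- pvLab of the reconstruction is lab itself
    apply List.ext_getElem
    · simp [pvLab, pvRange7, h7]
    · intro i hi1 hi2
      rw [h7] at hi2
      have hi7 : i < 7 := hi2
      simp only [pvLab]
      rw [List.getElem_map, pvRange7_getElem i hi7]
      have hmem : ((i : Int)) ∈ pvRange7 := by
        rw [mem_range7_iff]
        omega
      have hcr : pvRange7.contains (i : Int) = true := by
        rw [List.contains_iff_mem]
        exact hmem
      have hgd : lab.getD ((i : Int)).toNat 0 = lab[i] := by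
        rw [Int.toNat_natCast, List.getD_eq_getElem lab 0 (by omega)]
      have hb2 : (pvRange7.filter (fun h => lab.getD h.toNat 0 == 2)).contains (i : Int)
          = (lab[i] == 2) := by
        simp only [contains_filter, hcr, Bool.true_and]
        rw [hgd]
      have hb1 : ((pvRange7.filter (fun h => !(pvRange7.filter (fun h => lab.getD h.toNat 0 == 2)).contains h)).filter
            (fun h => lab.getD h.toNat 0 == 1)).contains (i : Int)
          = (!(lab[i] == 2) && (lab[i] == 1)) := by
        simp only [contains_filter, hcr, Bool.true_and]
        rw [hgd]
      rw [hb2, hb1]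
      rcases he lab[i] (lab.getElem_mem _) with hx | hx | hx <;> rw [hx] <;> decide
  · -- length of te2 = count 2
    rw [← List.countP_eq_length_filter, countP_range7_getD lab h7]
  · -- length of te1 = count 1
    rw [← List.countP_eq_length_filter, List.countP_filter,
        List.countP_congr (l := pvRange7)
          (q := fun h => lab.getD h.toNat 0 == 1)
          (by
            intro h hh
            have hcr : pvRange7.contains h = true := by
              rw [List.contains_iff_mem]; exact hh
            simp only [contains_filter, hcr, Bool.true_and]
            generalize lab.getD h.toNat 0 = x
            by_cases h1 : x = 1
            · subst h1
              decide
            · simp [h1]),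
        countP_range7_getD lab h7]

-- every tied team splits 7 and has nonnegative parts
theorem team_arith (t : Int × Int × Int) (ht : t ∈ pvTeamsB) :
    t.1 + t.2.1 + t.2.2 = 7 ∧ 0 ≤ t.1 ∧ 0 ≤ t.2.1 ∧ 0 ≤ t.2.2 := by
  fin_cases ht <;> decide

-- the two liking loops compute the same maximum
theorem pv_liking_eq (g : List (List Int)) (e : List (Int × Int)) (hg : pvGood g e)
    (tl : List (Int × Int × Int)) (htl : ∀ t ∈ tl, t ∈ pvTeamsB) :
    pvLikingA g tl = pvLikingB e tl := by
  -- step functions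
  have hmonoB : ∀ lk (lab : List Int), lk ≤
      (if tl.contains ((lab.count 0 : Int), (lab.count 1 : Int), (lab.count 2 : Int)) then
        (if pvVal e lab > lk then pvVal e lab else lk) else lk) := by
    intro lk lab
    split_ifs <;> omega
  have hmonoA1 : ∀ lk (team : Int × Int × Int) (te2 : List Int), lk ≤
      (PySem.List.combinations (pvRange7.filter (fun h => !te2.contains h)) team.2.1.toNat).foldl
        (fun lk te1 =>
          let te0 := (pvRange7.filter (fun h => !te2.contains h)).filter (fun h => !te1.contains h)
          let l1 := pvSumProd g te1
          let l0 := pvSumProd g te0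
          let l := pvSumProd g te2 + l1 + l0
          if l > lk then l else lk) lk := by
    intro lk team te2
    exact foldl_ge_acc _ _ lk (fun lk te1 _ => by
      show lk ≤ (if _ > lk then _ else lk)
      split_ifs <;> omega)
  have hmonoA : ∀ lk (team : Int × Int × Int), team ∈ tl → lk ≤
      (PySem.List.combinations pvRange7 team.2.2.toNat).foldl
        (fun lk te2 =>
          let left := pvRange7.filter (fun h => !te2.contains h)
          let l2 := pvSumProd g te2
          (PySem.List.combinations left team.2.1.toNat).foldl
            (fun lk te1 =>
              let te0 := left.filter (fun h => !te1.contains h)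
              let l1 := pvSumProd g te1
              let l0 := pvSumProd g te0
              let l := l2 + l1 + l0
              if l > lk then l else lk) lk) lk := by
    intro lk team _
    exact foldl_ge_acc _ _ lk (fun lk te2 _ => hmonoA1 lk team te2)
  apply le_antisymm
  · -- A ≤ B
    unfold pvLikingA
    refine foldl_le_bound _ _ _ 0 (foldl_ge_acc _ _ 0 (fun lk lab _ => hmonoB lk lab)) ?_
    intro lk team hteam hlk
    show (PySem.List.combinations pvRange7 team.2.2.toNat).foldl _ lk ≤ _
    refine foldl_le_bound _ _ _ lk hlk ?_
    intro lk te2 hte2 hlk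
    show (PySem.List.combinations _ team.2.1.toNat).foldl _ lk ≤ _
    refine foldl_le_bound _ _ _ lk hlk ?_
    intro lk te1 hte1 hlk
    show (if pvSumProd g te2 + pvSumProd g te1 + pvSumProd g _ > lk
          then pvSumProd g te2 + pvSumProd g te1 + pvSumProd g _ else lk) ≤ _
    rw [partition_L g e hg _ _ te2 te1 hte2 hte1]
    -- the value is reached inside B's fold
    have hguard : tl.contains (((pvLab te2 te1).count 0 : Int), ((pvLab te2 te1).count 1 : Int),
        ((pvLab te2 te1).count 2 : Int)) = true := by
      obtain ⟨hsub2, hl2⟩ := (PySem.List.mem_combinations_iff _ _ _).1 hte2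
      obtain ⟨hsub1, hl1⟩ := (PySem.List.mem_combinations_iff _ _ _).1 hte1
      obtain ⟨hc2, hc1, hc0⟩ := count_pvLab te2 te1 hsub2 hsub1
      obtain ⟨hs7, hn1, hn2, hn3⟩ := team_arith team (htl team hteam)
      have e2 : ((pvLab te2 te1).count 2 : Int) = team.2.2 := by
        rw [hc2, hl2]
        omega
      have e1 : ((pvLab te2 te1).count 1 : Int) = team.2.1 := by
        rw [hc1, hl1]
        omega
      have e0 : ((pvLab te2 te1).count 0 : Int) = team.1 := by
        have := hc0
        rw [hl2, hl1] at this
        omega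
      rw [e2, e1, e0, List.contains_iff_mem]
      exact hteam
    have hreach : pvVal e (pvLab te2 te1) ≤ pvLikingB e tl := by
      unfold pvLikingB
      refine foldl_reach _ _ _ (pvLab te2 te1) 0 (pvLab_mem_labs te2 te1)
        (fun lk lab _ => hmonoB lk lab) ?_
      intro lk
      show pvVal e (pvLab te2 te1) ≤
        (if tl.contains _ then (if pvVal e (pvLab te2 te1) > lk then _ else lk) else lk)
      rw [if_pos hguard]
      split_ifs <;> omega
    split_ifs <;> omega
  · -- B ≤ A
    unfold pvLikingB
    refine foldl_le_bound _ _ _ 0 (foldl_ge_acc _ _ 0 (fun lk team hteam => hmonoA lk team hteam)) ?_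
    intro lk lab hlab hlk
    show (if tl.contains _ then (if pvVal e lab > lk then pvVal e lab else lk) else lk) ≤ _
    by_cases hguard : tl.contains ((lab.count 0 : Int), (lab.count 1 : Int), (lab.count 2 : Int)) = true
    · rw [if_pos hguard]
      -- the guard names a tied team; reconstruct its partition from the labels
      have hteam : ((lab.count 0 : Int), (lab.count 1 : Int), (lab.count 2 : Int)) ∈ tl := by
        rw [← List.contains_iff_mem]
        exact hguard
      obtain ⟨hrec, hl2, hl1⟩ := lab_decompose lab hlab
      set te2 := pvRange7.filter (fun h => lab.getD h.toNat 0 == 2) with hte2def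
      set te1 := (pvRange7.filter (fun h => !te2.contains h)).filter
        (fun h => lab.getD h.toNat 0 == 1) with hte1def
      have hte2 : te2 ∈ PySem.List.combinations pvRange7 ((lab.count 2 : Int)).toNat := by
        rw [PySem.List.mem_combinations_iff]
        exact ⟨List.filter_sublist, by rw [hl2, Int.toNat_natCast]⟩
      have hte1 : te1 ∈ PySem.List.combinations (pvRange7.filter (fun h => !te2.contains h))
          ((lab.count 1 : Int)).toNat := by
        rw [PySem.List.mem_combinations_iff]
        exact ⟨List.filter_sublist, by rw [hte1def, hl1, Int.toNat_natCast]⟩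
      have hval : pvVal e lab ≤ pvLikingA g tl := by
        unfold pvLikingA
        refine foldl_reach _ _ _ (((lab.count 0 : Int), (lab.count 1 : Int), (lab.count 2 : Int)))
          0 hteam (fun lk team hteam => hmonoA lk team hteam) ?_
        intro lk0
        show pvVal e lab ≤ (PySem.List.combinations pvRange7 ((lab.count 2 : Int)).toNat).foldl _ lk0
        refine foldl_reach _ _ _ te2 lk0 hte2
          (fun lk te2' _ => hmonoA1 lk _ te2') ?_
        intro lk1
        show pvVal e lab ≤ (PySem.List.combinations _ ((lab.count 1 : Int)).toNat).foldl _ lk1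
        refine foldl_reach _ _ _ te1 lk1 hte1
          (fun lk te1' _ => by
            show lk ≤ (if _ > lk then _ else lk)
            split_ifs <;> omega) ?_
        intro lk2
        show pvVal e lab ≤ (if pvSumProd g te2 + pvSumProd g te1 + pvSumProd g _ > lk2
          then pvSumProd g te2 + pvSumProd g te1 + pvSumProd g _ else lk2)
        rw [partition_L g e hg _ _ te2 te1 hte2 hte1, hrec]
        split_ifs <;> omega
      split_ifs <;> omega
    · rw [if_neg hguard]
      exact hlk

-- ----- team selection (identical in A and B up to representation) -----

def pvStep (st : Option Int × List (Int × Int × Int)) (td : (Int × Int × Int) × Int) :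
    Option Int × List (Int × Int × Int) :=
  match st.1 with
  | none => (some td.2, [td.1])
  | some s => if td.2 < s then (some td.2, [td.1]) else if td.2 = s then (st.1, st.2 ++ [td.1]) else st

def pvMinF (s : Int) (l : List ((Int × Int × Int) × Int)) : Int :=
  l.foldl (fun m td => min m td.2) s

theorem pvMinF_le (l : List ((Int × Int × Int) × Int)) (s : Int) : pvMinF s l ≤ s := by
  induction l generalizing s with
  | nil => simp [pvMinF]
  | cons t l ih =>
    have := ih (min s t.2)
    simp only [pvMinF, List.foldl] at this ⊢
    omega

theorem pvMinF_achieved (l : List ((Int × Int × Int) × Int)) (s : Int) :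
    pvMinF s l = s ∨ ∃ x ∈ l, pvMinF s l = x.2 := by
  induction l generalizing s with
  | nil => left; rfl
  | cons t l ih =>
    have h := ih (min s t.2)
    simp only [pvMinF, List.foldl] at h ⊢
    rcases h with h | ⟨x, hx, he⟩
    · by_cases hle : s ≤ t.2
      · left; omega
      · right; exact ⟨t, by simp, by omega⟩
    · right; exact ⟨x, by simp [hx], he⟩

theorem pvMinF_le_mem (l : List ((Int × Int × Int) × Int)) (s : Int) :
    ∀ x ∈ l, pvMinF s l ≤ x.2 := by
  induction l generalizing s with
  | nil => simp
  | cons t l ih =>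
    intro x hx
    simp only [List.mem_cons] at hx
    have hle := pvMinF_le l (min s t.2)
    rcases hx with rfl | hx
    · simp only [pvMinF, List.foldl] at *; omega
    · have := ih (min s t.2) x hx
      simp only [pvMinF, List.foldl] at *; omega

theorem pvMinF_lt_iff (l : List ((Int × Int × Int) × Int)) (s : Int) :
    pvMinF s l < s ↔ l.any (fun td => td.2 < s) := by
  constructor
  · intro h
    rcases pvMinF_achieved l s with he | ⟨x, hx, he⟩
    · omega
    · exact List.any_eq_true.2 ⟨x, hx, by simp; omega⟩
  · intro h
    obtain ⟨x, hx, hlt⟩ := List.any_eq_true.1 h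
    have := pvMinF_le_mem l s x hx
    simp at hlt; omega

theorem pvFold (l : List ((Int × Int × Int) × Int)) (s : Int) (acc : List (Int × Int × Int)) :
    l.foldl pvStep (some s, acc) =
    (some (pvMinF s l),
     (if l.any (fun td => td.2 < s) then [] else acc) ++
       (l.filter (fun td => td.2 == pvMinF s l)).map (fun td => td.1)) := by
  induction l generalizing s acc with
  | nil => simp [pvMinF]
  | cons t l ih =>
    have hminf : pvMinF s (t :: l) = pvMinF (min s t.2) l := rfl
    rw [List.foldl_cons, List.any_cons, List.filter_cons, hminf]
    show l.foldl pvStep (pvStep (some s, acc) t) = _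
    have hle : pvMinF (min s t.2) l ≤ min s t.2 := pvMinF_le l (min s t.2)
    by_cases h1 : t.2 < s
    · have hstep : pvStep (some s, acc) t = (some t.2, [t.1]) := by
        simp [pvStep, h1]
      rw [hstep, ih]
      have hm : min s t.2 = t.2 := by omega
      rw [hm]
      have hany : (decide (t.2 < s) || l.any fun td => td.2 < s) = true := by simp [h1]
      rw [hany, if_pos rfl]
      by_cases h2 : l.any (fun td => td.2 < t.2) = true
      · have hlt : pvMinF t.2 l < t.2 := (pvMinF_lt_iff l t.2).2 h2
        rw [if_pos h2, if_neg (by simp; omega)]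
      · have hge : pvMinF t.2 l = t.2 := by
          have := pvMinF_le l t.2
          have h3 : ¬ pvMinF t.2 l < t.2 := fun hc => h2 ((pvMinF_lt_iff l t.2).1 hc)
          omega
        rw [if_neg h2, if_pos (by simp [hge])]
        simp
    · by_cases h1e : t.2 = s
      · have hstep : pvStep (some s, acc) t = (some s, acc ++ [t.1]) := by
          simp [pvStep, h1, h1e]
        rw [hstep, ih]
        have hm : min s t.2 = s := by omega
        rw [hm]
        have hany : (decide (t.2 < s) || l.any fun td => td.2 < s) = (l.any fun td => td.2 < s) := by
          simp [h1]
        rw [hany]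
        by_cases h2 : (l.any fun td => td.2 < s) = true
        · have hlt : pvMinF s l < s := (pvMinF_lt_iff l s).2 h2
          rw [if_pos h2, if_pos h2, if_neg (by simp; omega)]
        · have hge : pvMinF s l = s := by
            have := pvMinF_le l s
            have h3 : ¬ pvMinF s l < s := fun hc => h2 ((pvMinF_lt_iff l s).1 hc)
            omega
          rw [if_neg h2, if_neg h2, if_pos (by simp [h1e, hge])]
          simp
      · have hstep : pvStep (some s, acc) t = (some s, acc) := by
          simp [pvStep, h1, h1e]
        rw [hstep, ih]
        have hm : min s t.2 = s := by omega
        rw [hm]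
        have hany : (decide (t.2 < s) || l.any fun td => td.2 < s) = (l.any fun td => td.2 < s) := by
          simp [h1]
        rw [hany]
        have hle2 : pvMinF s l ≤ s := pvMinF_le l s
        have hhead : (t.2 == pvMinF s l) = false := by simp; omega
        rw [hhead]
        simp

theorem sel_lemma (e1 e2 e3 e4 : Int) (T1 T2 T3 T4 : Int × Int × Int) :
    [(T1,e1),(T2,e2),(T3,e3),(T4,e4)].foldl pvStep (none, []) =
    (some (min (min (min e1 e2) e3) e4),
     ([(T1,e1),(T2,e2),(T3,e3),(T4,e4)].filter
        (fun td => td.2 == min (min (min e1 e2) e3) e4)).map (fun td => td.1)) := by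
  have h0 : pvStep (none, []) (T1, e1) = (some e1, [T1]) := rfl
  have hm : pvMinF e1 [(T2,e2),(T3,e3),(T4,e4)] = min (min (min e1 e2) e3) e4 := by
    simp only [pvMinF, List.foldl]
  rw [List.foldl_cons, h0, pvFold, hm]
  congr 1
  conv_rhs => rw [List.filter_cons]
  by_cases h2 : ([(T2,e2),(T3,e3),(T4,e4)].any fun td => td.2 < e1) = true
  · have hlt : min (min (min e1 e2) e3) e4 < e1 := by
      have := (pvMinF_lt_iff [(T2,e2),(T3,e3),(T4,e4)] e1).2 h2
      rw [hm] at this; exact this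
    have hh : (e1 == min (min (min e1 e2) e3) e4) = false := by
      rw [beq_eq_false_iff_ne]; omega
    rw [if_pos h2, if_neg (by rw [hh]; exact Bool.false_ne_true)]
    simp
  · have heq : min (min (min e1 e2) e3) e4 = e1 := by
      have h3 : ¬ pvMinF e1 [(T2,e2),(T3,e3),(T4,e4)] < e1 :=
        fun hc => h2 ((pvMinF_lt_iff _ e1).1 hc)
      rw [hm] at h3
      have hle : min (min (min e1 e2) e3) e4 ≤ e1 := by omega
      omega
    have hh : (e1 == min (min (min e1 e2) e3) e4) = true := by
      rw [beq_iff_eq]; omega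
    rw [if_neg h2, if_pos (by rw [hh])]
    simp

theorem pv_sel_eq (a b c : Int) : pvSelA a b c = (some (pvBest a b c), pvTeamAll a b c) := by
  have hA : pvSelA a b c =
      [((1,1,5), max (max (PySem.Int.floordiv a 1) (PySem.Int.floordiv b 1)) (PySem.Int.floordiv c 5)
          - min (min (PySem.Int.floordiv a 1) (PySem.Int.floordiv b 1)) (PySem.Int.floordiv c 5)),
       ((1,2,4), max (max (PySem.Int.floordiv a 1) (PySem.Int.floordiv b 2)) (PySem.Int.floordiv c 4)
          - min (min (PySem.Int.floordiv a 1) (PySem.Int.floordiv b 2)) (PySem.Int.floordiv c 4)),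
       ((1,3,3), max (max (PySem.Int.floordiv a 1) (PySem.Int.floordiv b 3)) (PySem.Int.floordiv c 3)
          - min (min (PySem.Int.floordiv a 1) (PySem.Int.floordiv b 3)) (PySem.Int.floordiv c 3)),
       ((2,2,3), max (max (PySem.Int.floordiv a 2) (PySem.Int.floordiv b 2)) (PySem.Int.floordiv c 3)
          - min (min (PySem.Int.floordiv a 2) (PySem.Int.floordiv b 2)) (PySem.Int.floordiv c 3))].foldl pvStep (none, []) := rfl
  have hBest : pvBest a b c =
      min (min (min
        (max (max (PySem.Int.floordiv a 1) (PySem.Int.floordiv b 1)) (PySem.Int.floordiv c 5)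
          - min (min (PySem.Int.floordiv a 1) (PySem.Int.floordiv b 1)) (PySem.Int.floordiv c 5))
        (max (max (PySem.Int.floordiv a 1) (PySem.Int.floordiv b 2)) (PySem.Int.floordiv c 4)
          - min (min (PySem.Int.floordiv a 1) (PySem.Int.floordiv b 2)) (PySem.Int.floordiv c 4)))
        (max (max (PySem.Int.floordiv a 1) (PySem.Int.floordiv b 3)) (PySem.Int.floordiv c 3)
          - min (min (PySem.Int.floordiv a 1) (PySem.Int.floordiv b 3)) (PySem.Int.floordiv c 3)))
        (max (max (PySem.Int.floordiv a 2) (PySem.Int.floordiv b 2)) (PySem.Int.floordiv c 3)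
          - min (min (PySem.Int.floordiv a 2) (PySem.Int.floordiv b 2)) (PySem.Int.floordiv c 3)) := by
    simp [pvBest, pvDiffs, pvTeamsB, PySem.List.min?_id_cons]
  rw [hA, sel_lemma]
  refine Prod.ext (by rw [hBest]) ?_
  show _ = pvTeamAll a b c
  rw [pvTeamAll, hBest]
  rfl

-- the tied teams produced by the selection are among the four size triples
theorem teamAll_sub (a b c : Int) : ∀ t ∈ pvTeamAll a b c, t ∈ pvTeamsB := by
  intro t ht
  simp only [pvTeamAll, List.mem_map, List.mem_filter] at ht
  obtain ⟨td, ⟨hmem, _⟩, rfl⟩ := ht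
  exact (List.of_mem_zip hmem).1

-- ===== VERDICT (by name: the statement is the Claim_ definition above) =====
theorem minimize_experience_difference_and_maximize_liking_spec : Claim_equal_minimize_experience_difference_and_maximize_liking := by
  intro n likings experience _hDom hPre
  unfold Spec_minimize_experience_difference_and_maximize_liking
  unfold minimize_experience_difference_and_maximize_liking minimize_experience_difference_and_maximize_liking_alt
  obtain ⟨hlen, hnames⟩ := hPre
  have hslen : (PySem.List.sorted experience (fun x => x) false).length = 3 := by
    rw [PySem.List.length_sorted]; exact hlen
  rcases hs : PySem.List.sorted experience (fun x => x) false with _ | ⟨a, _ | ⟨b, _ | ⟨c, _ | _⟩⟩⟩ <;>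
    simp [hs] at hslen ⊢
  rw [pv_sel_eq]
  exact ⟨rfl, pv_liking_eq _ _ (pv_graph_edges_good likings hnames) _ (teamAll_sub a b c)⟩
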